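-- pv_equiv track=rewrite | github.com/myrice12/TheoryAgent | theoryagent/skills.py | _extract_yaml_frontmatter
-- ===== SOURCE A (Python) =====
-- def _extract_yaml_frontmatter(text: str) -> tuple[str, str]:
--     """Return (name, description) from YAML frontmatter, or ("", "")."""
--     if not text.startswith("---"):
--         return "", ""
--     end = text.find("---", 3)
--     if end == -1:
--         return "", ""
--     fm = text[3:end]
--     name = desc = ""
--     for line in fm.split("\n"):
--         line = line.strip()
--         if line.startswith("name:"):
--             name = line.split(":", 1)[1].strip().strip('"').strip("'")
--         elif line.startswith("description:"):
--             desc = line.split(":", 1)[1].strip().strip('"').strip("'")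
--     return name, desc
-- ===== SOURCE B (Python) =====
-- def _extract_yaml_frontmatter(text: str) -> tuple[str, str]:
--     """Return (name, description) from YAML frontmatter, or ("", "")."""
--     if not text.startswith("---"):
--         return "", ""
--     end = text.find("---", 3)
--     if end == -1:
--         return "", ""
--     lines = text[3:end].split("\n")
--
--     def last_value(key: str) -> str:
--         # scan backwards: the first match from the end is the last-written value
--         for raw in reversed(lines):
--             line = raw.strip()
--             if line.startswith(key):
--                 return line.split(":", 1)[1].strip().strip('"').strip("'")
--         return ""
--
--     return last_value("name:"), last_value("description:")
-- ===== Notes on version B (the rewrite author's own statement) =====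
-- stated objective: alternative
-- what changed: A's single left-to-right fold carrying two accumulator variables is replaced by a per-key backward search: B splits the frontmatter into lines once and, for each key, scans the lines in reverse returning at the first match (which is A's last-wins value), with early exit and no accumulators.
import Mathlib
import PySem

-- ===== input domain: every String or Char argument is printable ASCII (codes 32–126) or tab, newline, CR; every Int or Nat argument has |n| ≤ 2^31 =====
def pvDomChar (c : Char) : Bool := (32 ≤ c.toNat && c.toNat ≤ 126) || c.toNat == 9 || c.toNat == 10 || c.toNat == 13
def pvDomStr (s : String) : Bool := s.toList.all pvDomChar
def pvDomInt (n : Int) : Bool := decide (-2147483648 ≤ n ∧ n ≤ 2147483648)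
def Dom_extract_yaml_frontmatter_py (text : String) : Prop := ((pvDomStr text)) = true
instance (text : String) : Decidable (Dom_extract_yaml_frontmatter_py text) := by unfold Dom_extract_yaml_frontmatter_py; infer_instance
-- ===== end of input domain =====

set_option maxRecDepth 8000


-- B replaces A's left-to-right fold over two accumulators by a per-key backward scan of the
-- lines that returns at the first (= last-written) match (objective: alternative).

-- ===== PORT A =====
-- loop body of A's for-line loop: state = (name, desc)
def pvAStep (st : String × String) (line : String) : String × String :=
  let line := PySem.Str.strip line
  if PySem.Str.startswith line "name:" then
    (PySem.Str.stripChars (PySem.Str.stripChars (PySem.Str.strip (PySem.List.pyGetD ((PySem.Str.splitMax? line ":" 1).getD []) 1 "")) "\"") "'", st.2)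
  else if PySem.Str.startswith line "description:" then
    (st.1, PySem.Str.stripChars (PySem.Str.stripChars (PySem.Str.strip (PySem.List.pyGetD ((PySem.Str.splitMax? line ":" 1).getD []) 1 "")) "\"") "'")
  else st

def extract_yaml_frontmatter_py (text : String) : String × String :=
  if !(PySem.Str.startswith text "---") then ("", "")
  else
    let e := PySem.Str.findFrom text "---" 3
    if e = -1 then ("", "")
    else
      let fm := PySem.Str.slice text (some 3) (some e)
      ((PySem.Str.split? fm "\n").getD []).foldl pvAStep ("", "")

-- ===== PORT B =====
-- B's value parser: line.split(":", 1)[1].strip().strip('"').strip("'")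
def pvBParse (line : String) : String :=
  PySem.Str.stripChars (PySem.Str.stripChars (PySem.Str.strip (PySem.List.pyGetD ((PySem.Str.splitMax? line ":" 1).getD []) 1 "")) "\"") "'"

-- B's last_value: first match scanning the REVERSED line list, early exit
def pvLastVal (key : String) : List String → String
  | [] => ""
  | raw :: rest =>
    let line := PySem.Str.strip raw
    if PySem.Str.startswith line key then pvBParse line else pvLastVal key rest

def extract_yaml_frontmatter_py_alt (text : String) : String × String :=
  if !(PySem.Str.startswith text "---") then ("", "")
  else
    let e := PySem.Str.findFrom text "---" 3
    if e = -1 then ("", "")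
    else
      let lines := (PySem.Str.split? (PySem.Str.slice text (some 3) (some e)) "\n").getD []
      (pvLastVal "name:" lines.reverse, pvLastVal "description:" lines.reverse)

-- ===== PRECONDITION & SPEC =====
def Spec_extract_yaml_frontmatter_py (text : String) (out : String × String) : Prop := out = extract_yaml_frontmatter_py_alt text
instance (text : String) (out : String × String) : Decidable (Spec_extract_yaml_frontmatter_py text out) := by unfold Spec_extract_yaml_frontmatter_py; infer_instance

-- ===== CLAIM (what is proved, stated in full; the proofs are below) =====
def Claim_equal_extract_yaml_frontmatter_py : Prop := ∀ (text : String), Dom_extract_yaml_frontmatter_py text → Spec_extract_yaml_frontmatter_py text (extract_yaml_frontmatter_py text)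

-- ===== LEMMAS AND PROOFS =====

-- a line cannot start with both "name:" and "description:" (the heads differ)
theorem pv_not_both (l : List Char)
    (h1 : PySem.Chars.startswith l ['n','a','m','e',':'] = true)
    (h2 : PySem.Chars.startswith l ['d','e','s','c','r','i','p','t','i','o','n',':'] = true) : False := by
  rw [PySem.Chars.startswith_iff] at h1 h2
  obtain ⟨t1, e1⟩ := h1
  obtain ⟨t2, e2⟩ := h2
  have := e1.trans e2.symm
  simp at this

-- main invariant: A's fold over the lines equals B's backward first-match, per key
theorem pv_main (r : List String) :
    r.reverse.foldl pvAStep ("", "") = (pvLastVal "name:" r, pvLastVal "description:" r) := by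
  induction r with
  | nil => simp [pvLastVal]
  | cons x rest ih =>
    rw [List.reverse_cons, List.foldl_append, ih]
    simp only [List.foldl_cons, List.foldl_nil, pvAStep, pvLastVal]
    split_ifs with hn hd hd
    · exact (pv_not_both _ hn hd).elim
    · simp [pvBParse]
    · simp [pvBParse]
    · rfl

-- ===== VERDICT (by name: the statement is the Claim_ definition above) =====
theorem extract_yaml_frontmatter_py_spec : Claim_equal_extract_yaml_frontmatter_py := by
  intro text _
  unfold Spec_extract_yaml_frontmatter_py
  simp only [extract_yaml_frontmatter_py, extract_yaml_frontmatter_py_alt]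
  split_ifs with h1 h2
  · rfl
  · rfl
  · have := pv_main ((PySem.Str.split? (PySem.Str.slice text (some 3)
      (some (PySem.Str.findFrom text "---" 3))) "\n").getD []).reverse
    rw [List.reverse_reverse] at this
    exact this
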